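-- pv_equiv track=rewrite | github.com/LucasBringsken/dotenv-diff | src/dotenv_diff/utils.py | build_matrix_data
-- ===== SOURCE A (Python) =====
-- def build_matrix_data(variable_map):
--     keys = list(variable_map.keys())
--     files = sorted({f for values in variable_map.values() for f in values})
--
--     matrix = []
--     for key in keys:
--         row = [variable_map[key].get(f) for f in files]
--         matrix.append((key, row))
--
--     return files, matrix
-- ===== SOURCE B (Python) =====
-- def _insert_unique(files, f):
--     """Return files (a strictly-sorted list) with f inserted at its lower bound;
--     unchanged if f is already present."""
--     i = 0
--     for g in files:
--         if not (g < f):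
--             break
--         i += 1
--     if i < len(files) and files[i] == f:
--         return files
--     return files[:i] + [f] + files[i:]
--
--
-- def _row(values, file_index, n):
--     row = [None] * n
--     for f, val in values.items():
--         row[file_index[f]] = val
--     return row
--
--
-- def build_matrix_data(variable_map):
--     files = []
--     for values in variable_map.values():
--         for f in values:
--             files = _insert_unique(files, f)
--     file_index = {f: i for i, f in enumerate(files)}
--     n = len(files)
--     matrix = [(key, _row(values, file_index, n)) for key, values in variable_map.items()]
--     return files, matrix
-- ===== Notes on version B (the rewrite author's own statement) =====
-- stated objective: alternative
-- what changed: B builds the file union as a strictly-sorted duplicate-free list by ordered insertion (no set-then-sort pass) and fills each row by scattering the inner dict's present entries through a file->index table into a None-preinitialized list, instead of A's per-cell .get gather over sorted(set(...)).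
import Mathlib
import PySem

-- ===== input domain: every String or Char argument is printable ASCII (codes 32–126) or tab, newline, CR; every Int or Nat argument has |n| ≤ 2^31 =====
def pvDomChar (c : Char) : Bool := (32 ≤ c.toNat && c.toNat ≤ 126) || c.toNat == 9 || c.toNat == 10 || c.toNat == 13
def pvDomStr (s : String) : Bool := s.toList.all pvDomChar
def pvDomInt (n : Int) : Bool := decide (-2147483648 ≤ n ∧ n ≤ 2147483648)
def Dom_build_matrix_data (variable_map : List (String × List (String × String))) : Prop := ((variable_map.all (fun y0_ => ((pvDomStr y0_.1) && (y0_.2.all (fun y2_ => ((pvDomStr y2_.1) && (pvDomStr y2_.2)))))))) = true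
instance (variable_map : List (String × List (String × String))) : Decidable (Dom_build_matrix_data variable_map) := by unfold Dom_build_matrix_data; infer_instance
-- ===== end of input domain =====

-- B maintains the file union as a strictly-sorted list by ordered insertion (no set + sort pass)
-- and scatters each inner dict's entries into a None-filled row via a file->index table,
-- instead of A's sort-of-a-set plus per-cell .get gather; objective: alternative algorithm, no speed claim.

-- ===== PORT A =====
def build_matrix_data (variable_map : List (String × List (String × String))) : List String × (List (String × List (Option String))) :=
  let d := PySem.Dict.ofList variable_map
  let keys := d.keys
  let files := PySem.List.sorted
    (PySem.Set.ofList (d.values.foldl (fun acc values => acc ++ (PySem.Dict.ofList values).keys) []))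
    (fun x => x) false
  let matrix := keys.foldl
    (fun m key => m ++ [(key, files.map (fun f => (PySem.Dict.ofList (d.getD key [])).get? f))]) []
  (files, matrix)

-- ===== PORT B =====
def pvLowerBound : List String → String → Nat
  | [], _ => 0
  | g :: t, f => if g < f then pvLowerBound t f + 1 else 0

def pvInsertUnique (files : List String) (f : String) : List String :=
  let i := pvLowerBound files f
  if i < files.length ∧ files[i]? = some f then files
  else files.take i ++ [f] ++ files.drop i

def pvRow (values : List (String × String)) (file_index : PySem.Dict String Int) (n : Nat) : List (Option String) :=
  (PySem.Dict.ofList values).items.foldl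
    (fun row p => PySem.List.pySetD row (file_index.getD p.1 0) (some p.2))
    (List.replicate n (none : Option String))

def build_matrix_data_alt (variable_map : List (String × List (String × String))) : List String × (List (String × List (Option String))) :=
  let d := PySem.Dict.ofList variable_map
  let files := d.values.foldl
    (fun fs values => (PySem.Dict.ofList values).keys.foldl (fun fs f => pvInsertUnique fs f) fs) []
  let file_index := PySem.Dict.ofList ((PySem.List.enumerate files 0).map (fun p => (p.2, p.1)))
  let n := files.length
  (files, d.items.map (fun kv => (kv.1, pvRow kv.2 file_index n)))

-- ===== PRECONDITION & SPEC =====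
def Spec_build_matrix_data (variable_map : List (String × List (String × String))) (out : List String × (List (String × List (Option String)))) : Prop := out = build_matrix_data_alt variable_map
instance (variable_map : List (String × List (String × String))) (out : List String × (List (String × List (Option String)))) : Decidable (Spec_build_matrix_data variable_map out) := by unfold Spec_build_matrix_data; infer_instance

-- ===== CLAIM (what is proved, stated in full; the proofs are below) =====
def Claim_equal_build_matrix_data : Prop := ∀ (variable_map : List (String × List (String × String))), Dom_build_matrix_data variable_map → Spec_build_matrix_data variable_map (build_matrix_data variable_map)

-- ===== LEMMAS AND PROOFS =====

theorem pv_take_lb_lt (l : List String) (f : String) :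
    ∀ a ∈ l.take (pvLowerBound l f), a < f := by
  induction l with
  | nil => simp
  | cons g t ih =>
    simp only [pvLowerBound]
    split_ifs with h1
    · intro a ha
      rcases List.mem_cons.mp (by simpa using ha) with rfl | ha'
      · exact h1
      · exact ih a ha'
    · simp

theorem pv_lb_get_not_lt (l : List String) (f : String) :
    ∀ x, l[pvLowerBound l f]? = some x → ¬ x < f := by
  induction l with
  | nil => simp
  | cons g t ih =>
    simp only [pvLowerBound]
    split_ifs with h1
    · simp only [List.getElem?_cons_succ]
      exact ih
    · intro x hx
      simp only [List.getElem?_cons_zero, Option.some.injEq] at hx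
      subst hx
      simpa using h1

theorem pv_mem_insertUnique (l : List String) (f a : String) :
    a ∈ pvInsertUnique l f ↔ a = f ∨ a ∈ l := by
  unfold pvInsertUnique
  dsimp only
  split_ifs with hc
  · have hf : f ∈ l := List.mem_of_getElem? hc.2
    constructor
    · intro h; exact Or.inr h
    · rintro (rfl | h)
      · exact hf
      · exact h
  · conv_rhs => rw [← List.take_append_drop (pvLowerBound l f) l]
    simp only [List.mem_append, List.mem_cons]
    tauto

theorem pv_pairwise_insertUnique (l : List String) (f : String)
    (h : l.Pairwise (· < ·)) : (pvInsertUnique l f).Pairwise (· < ·) := by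
  unfold pvInsertUnique
  dsimp only
  split_ifs with hc
  · exact h
  · set i := pvLowerBound l f with hi
    have h' : (l.take i ++ l.drop i).Pairwise (· < ·) := by
      rw [List.take_append_drop]; exact h
    obtain ⟨hpw_take, hpw_drop, hcross⟩ := List.pairwise_append.mp h'
    have hfd : ∀ b ∈ l.drop i, f < b := by
      by_cases hil : i < l.length
      · have hd : l.drop i = l[i] :: l.drop (i + 1) := List.drop_eq_getElem_cons hil
        have hne : l[i] ≠ f := by
          intro hEq
          exact hc ⟨hil, by rw [List.getElem?_eq_getElem hil, hEq]⟩
        have hflt : f < l[i] :=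
          lt_of_le_of_ne
            (not_lt.mp (pv_lb_get_not_lt l f l[i] (List.getElem?_eq_getElem hil)))
            (Ne.symm hne)
        intro b hb
        rw [hd] at hb
        rcases List.mem_cons.mp hb with rfl | hb'
        · exact hflt
        · have : l[i] < b := (List.pairwise_cons.mp (hd ▸ hpw_drop)).1 b hb'
          exact lt_trans hflt this
      · rw [List.drop_eq_nil_of_le (not_lt.mp hil)]
        simp
    rw [List.append_assoc]
    apply List.pairwise_append.mpr
    refine ⟨hpw_take, ?_, ?_⟩
    · exact List.pairwise_cons.mpr ⟨hfd, hpw_drop⟩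
    · intro a ha b hb
      rcases List.mem_cons.mp (by simpa using hb) with hb0 | hb'
      · exact hb0 ▸ pv_take_lb_lt l f a ha
      · exact hcross a ha b hb'

theorem pv_mem_foldl_ins (L : List String) (acc : List String) (a : String) :
    a ∈ L.foldl (fun fs f => pvInsertUnique fs f) acc ↔ a ∈ L ∨ a ∈ acc := by
  induction L generalizing acc with
  | nil => simp
  | cons x t ih =>
    simp only [List.foldl_cons, ih, pv_mem_insertUnique, List.mem_cons]
    tauto

theorem pv_pairwise_foldl_ins (L : List String) (acc : List String)
    (h : acc.Pairwise (· < ·)) :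
    (L.foldl (fun fs f => pvInsertUnique fs f) acc).Pairwise (· < ·) := by
  induction L generalizing acc with
  | nil => exact h
  | cons x t ih => exact ih _ (pv_pairwise_insertUnique acc x h)

theorem pv_foldl_ins_flatMap {α : Type} (g : α → List String) (l : List α) (acc : List String) :
    l.foldl (fun fs v => (g v).foldl (fun fs f => pvInsertUnique fs f) fs) acc
      = (l.flatMap g).foldl (fun fs f => pvInsertUnique fs f) acc := by
  induction l generalizing acc with
  | nil => rfl
  | cons x t ih => simp [List.foldl_cons, List.flatMap_cons, List.foldl_append, ih]

theorem pv_files_eq (L : List String) :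
    PySem.List.sorted (PySem.Set.ofList L) (fun x => x) false
      = L.foldl (fun fs f => pvInsertUnique fs f) [] := by
  apply PySem.List.sorted_eq_of_perm_of_pairwise_lt
  · apply (List.perm_ext_iff_of_nodup ?_ (PySem.Set.nodup_ofList L)).mpr
    · intro a
      rw [pv_mem_foldl_ins, PySem.Set.mem_ofList]
      simp
    · exact (pv_pairwise_foldl_ins L [] (by simp)).nodup
  · exact pv_pairwise_foldl_ins L [] (by simp)

theorem pv_foldl_snoc_map {α β : Type} (g : α → β) (l : List α) (init : List β) :
    l.foldl (fun m x => m ++ [g x]) init = init ++ l.map g := by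
  induction l generalizing init with
  | nil => simp
  | cons a t ih => simp [List.foldl_cons, ih]

theorem pv_items_ofList_nodup {κ ν : Type} [BEq κ] [LawfulBEq κ] (ps : List (κ × ν))
    (h : (ps.map (fun x => x.1)).Nodup) : (PySem.Dict.ofList ps).items = ps := by
  have := PySem.Dict.items_foldl_insert_fresh ps (fun x => x.1) (fun x => x.2) PySem.Dict.empty
    (by intro a _; simp [PySem.Dict.contains_empty]) h
  simpa using this

theorem pv_fidx_get (fs : List String) (hnd : fs.Nodup) (j : Nat) (hj : j < fs.length) :
    (PySem.Dict.ofList ((PySem.List.enumerate fs 0).map (fun p => (p.2, p.1)))).getD fs[j] 0 = (j : Int) := by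
  have hkeys : (((PySem.List.enumerate fs 0).map (fun p => (p.2, p.1))).map (fun x => x.1)).Nodup := by
    simp only [List.map_map]
    have h2 : ((PySem.List.enumerate fs 0).map ((fun x => x.1) ∘ (fun p => (p.2, p.1)))) = fs :=
      PySem.List.map_snd_enumerate fs 0
    rw [h2]; exact hnd
  apply PySem.Dict.getD_of_mem_items _ _ (PySem.Dict.nodup_keys_ofList _)
  rw [pv_items_ofList_nodup _ hkeys]
  have hj' : j < (PySem.List.enumerate fs 0).length := by
    rw [PySem.List.length_enumerate]; exact hj
  have : ((PySem.List.enumerate fs 0).map (fun p => (p.2, p.1)))[j]'(by simpa using hj) = (fs[j], (j : Int)) := by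
    rw [List.getElem_map, PySem.List.getElem_enumerate]
    simp
  rw [← this]
  exact List.getElem_mem _

theorem pv_scatter_length (fix : PySem.Dict String Int) :
    ∀ (items : List (String × String)) (row : List (Option String)),
    (items.foldl (fun r p => PySem.List.pySetD r (fix.getD p.1 0) (some p.2)) row).length = row.length := by
  intro items
  induction items with
  | nil => intro row; rfl
  | cons p rest ih =>
    intro row
    simp only [List.foldl_cons]
    rw [ih, PySem.List.length_pySetD]

theorem pv_scatter_get (fs : List String) (hnd : fs.Nodup) (fix : PySem.Dict String Int)
    (hfix : ∀ (i : Nat) (hi : i < fs.length), fix.getD fs[i] 0 = (i : Int)) :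
    ∀ (items : List (String × String)) (row : List (Option String)),
    (∀ p ∈ items, p.1 ∈ fs) → ((items.map (fun x => x.1)).Nodup) → row.length = fs.length →
    ∀ (j : Nat) (hj : j < fs.length),
    (items.foldl (fun r p => PySem.List.pySetD r (fix.getD p.1 0) (some p.2)) row)[j]? =
      (match (PySem.Dict.mk items).get? fs[j] with
       | some v => some (some v)
       | none => row[j]?) := by
  intro items
  induction items with
  | nil =>
    intro row _ _ _ j hj
    rfl
  | cons p rest ih =>
    intro row hsub hk hlen j hj
    obtain ⟨f, v⟩ := p
    have hf : f ∈ fs := hsub (f, v) List.mem_cons_self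
    obtain ⟨i, hi, hfi⟩ := List.mem_iff_getElem.mp hf
    have hfixf : fix.getD f 0 = (i : Int) := by rw [← hfi]; exact hfix i hi
    simp only [List.foldl_cons, hfixf, PySem.List.pySetD_natCast]
    rw [ih (row.set i (some v)) (fun q hq => hsub q (List.mem_cons_of_mem _ hq))
      (by simpa using hk.of_cons) (by rw [List.length_set]; exact hlen) j hj]
    rw [PySem.Dict.get?_mk_cons]
    by_cases hfj : f = fs[j]
    · have hij : i = j := by
        apply hnd.getElem_inj_iff.mp
        rw [hfi, hfj]
      have hrest : (PySem.Dict.mk rest).get? fs[j] = none := by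
        rw [PySem.Dict.get?_eq_none_iff_not_mem_keys, PySem.Dict.keys_mk]
        rw [← hfj]
        simp only [List.map_cons, List.nodup_cons] at hk
        exact hk.1
      rw [hrest]
      simp only [hfj, beq_self_eq_true, if_true]
      subst hij
      rw [List.getElem?_set_self]
      rw [hlen]; exact hj
    · have hij : i ≠ j := by
        intro h; subst h; exact hfj hfi.symm
      have : (f == fs[j]) = false := by simpa using hfj
      rw [this]
      simp only [Bool.false_eq_true, if_false]
      rw [List.getElem?_set_ne hij]

theorem pv_row_eq (fs : List String) (hnd : fs.Nodup) (fix : PySem.Dict String Int)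
    (hfix : ∀ (i : Nat) (hi : i < fs.length), fix.getD fs[i] 0 = (i : Int))
    (inner : PySem.Dict String String) (hkn : inner.keys.Nodup)
    (hsub : ∀ k ∈ inner.keys, k ∈ fs) :
    fs.map (fun f => inner.get? f) =
      inner.items.foldl (fun r p => PySem.List.pySetD r (fix.getD p.1 0) (some p.2))
        (List.replicate fs.length (none : Option String)) := by
  apply List.ext_getElem?
  intro j
  by_cases hj : j < fs.length
  · rw [List.getElem?_map, List.getElem?_eq_getElem hj]
    have hsub' : ∀ p ∈ inner.items, p.1 ∈ fs := by
      intro p hp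
      exact hsub p.1 (PySem.Dict.mem_keys_of_mem_items inner hp)
    rw [pv_scatter_get fs hnd fix hfix inner.items _ hsub' hkn (List.length_replicate) j hj]
    have : PySem.Dict.mk inner.items = inner := rfl
    rw [this]
    cases h : inner.get? fs[j] with
    | some v => simp [h]
    | none => simp [h, hj]
  · have h1 : (fs.map (fun f => inner.get? f))[j]? = none := by
      rw [List.getElem?_eq_none]
      simpa using Nat.le_of_not_lt hj
    have h2 : (inner.items.foldl (fun r p => PySem.List.pySetD r (fix.getD p.1 0) (some p.2))
        (List.replicate fs.length (none : Option String)))[j]? = none := by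
      rw [List.getElem?_eq_none]
      rw [pv_scatter_length, List.length_replicate]
      exact Nat.le_of_not_lt hj
    rw [h1, h2]

theorem build_matrix_data_main (variable_map : List (String × List (String × String))) :
    build_matrix_data variable_map = build_matrix_data_alt variable_map := by
  unfold build_matrix_data build_matrix_data_alt
  dsimp only
  set d := PySem.Dict.ofList variable_map with hd
  set L := d.values.foldl (fun acc values => acc ++ (PySem.Dict.ofList values).keys) [] with hL
  have hLflat : L = d.values.flatMap (fun values => (PySem.Dict.ofList values).keys) := by
    rw [hL, PySem.List.foldl_append_eq_flatMap, List.nil_append]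
  have hfileseq : d.values.foldl
      (fun fs values => (PySem.Dict.ofList values).keys.foldl (fun fs f => pvInsertUnique fs f) fs) []
      = PySem.List.sorted (PySem.Set.ofList L) (fun x => x) false := by
    rw [pv_foldl_ins_flatMap, pv_files_eq, hLflat]
  rw [hfileseq]
  set fs := PySem.List.sorted (PySem.Set.ofList L) (fun x => x) false with hfs
  set fix := PySem.Dict.ofList ((PySem.List.enumerate fs 0).map (fun p => (p.2, p.1))) with hfix
  have hnd : fs.Nodup := by
    have := PySem.List.sorted_ofList_pairwise_lt L
    exact this.imp ne_of_lt
  have hfixf : ∀ (i : Nat) (hi : i < fs.length), fix.getD fs[i] 0 = (i : Int) := by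
    intro i hi
    exact pv_fidx_get fs hnd i hi
  apply congrArg (Prod.mk fs)
  rw [pv_foldl_snoc_map]
  simp only [List.nil_append]
  have hkeys : d.keys = d.items.map (fun x => x.1) := rfl
  rw [hkeys, List.map_map]
  apply List.map_congr_left
  intro kv hkv
  have hval : d.getD kv.1 [] = kv.2 :=
    PySem.Dict.getD_of_mem_items d (by exact hkv) (PySem.Dict.nodup_keys_ofList _) []
  simp only [Function.comp_apply, hval]
  apply congrArg (Prod.mk kv.1)
  unfold pvRow
  apply pv_row_eq fs hnd fix hfixf (PySem.Dict.ofList kv.2) (PySem.Dict.nodup_keys_ofList _)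
  intro k hk
  rw [hfs, PySem.List.mem_sorted, PySem.Set.mem_ofList, hLflat, List.mem_flatMap]
  refine ⟨kv.2, ?_, hk⟩
  have : d.values = d.items.map (fun x => x.2) := rfl
  rw [this]
  exact List.mem_map_of_mem hkv

-- ===== VERDICT (by name: the statement is the Claim_ definition above) =====
theorem build_matrix_data_spec : Claim_equal_build_matrix_data := by
  intro vm _
  exact build_matrix_data_main vm
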